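-- pv_equiv track=rewrite | github.com/pypi-data/pypi-mirror-221 | packages/owl-builder/owl_builder-0.2.3.tar.gz/owl_builder-0.2.3/owl_builder/keyterms/svc/generate_taxonomy_dataframe.py | _decompose_term
-- ===== SOURCE A (Python) =====
-- def _decompose_term(
--                     term: str) -> list:
--     taxonomy = []
--
--     tokens = term.split()
--     if len(tokens) == 1:
--         return [term]
--
--     for i in range(len(tokens)):
--         current = tokens[:i]
--         if len(current):
--             current.reverse()
--             taxonomy.append(' '.join(current))
--
--     return taxonomy
-- ===== SOURCE B (Python) =====
-- def _decompose_term(term: str) -> list: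
--     tokens = term.split()
--     if len(tokens) == 1:
--         return [term]
--     taxonomy = []
--     prefix = []
--     for tok in tokens[:-1]:
--         prefix = [tok] + prefix
--         taxonomy.append(' '.join(prefix))
--     return taxonomy
-- ===== Notes on version B (the rewrite author's own statement) =====
-- stated objective: alternative
-- what changed: Replaces the per-iteration slice+in-place-reverse+join over range(len(tokens)) with a single forward pass over tokens[:-1] that prepends each token to an accumulator prefix and joins it, so no repeated slicing/reversing of growing lists.
import Mathlib
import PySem

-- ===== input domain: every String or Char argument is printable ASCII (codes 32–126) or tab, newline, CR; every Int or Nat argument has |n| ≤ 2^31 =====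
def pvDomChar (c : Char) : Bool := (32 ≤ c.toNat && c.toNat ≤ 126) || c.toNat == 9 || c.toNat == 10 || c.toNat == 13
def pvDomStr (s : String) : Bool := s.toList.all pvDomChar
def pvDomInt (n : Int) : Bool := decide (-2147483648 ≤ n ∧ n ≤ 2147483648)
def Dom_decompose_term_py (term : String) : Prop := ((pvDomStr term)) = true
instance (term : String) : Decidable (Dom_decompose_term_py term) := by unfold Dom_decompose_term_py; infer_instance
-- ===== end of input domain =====

-- B replaces A's per-iteration slice+reverse with a single forward pass maintaining an
-- accumulator prefix (alternative decomposition, same results).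

-- ===== PORT A =====
def decompose_term_py (term : String) : List String :=
  let tokens := PySem.Str.split₀ term
  if tokens.length == 1 then [term]
  else
    (PySem.List.pyRange 0 tokens.length 1).foldl
      (fun taxonomy i =>
        let current := PySem.List.slice tokens (some 0) (some i)
        if current.length ≠ 0 then
          taxonomy ++ [PySem.Str.join " " current.reverse]
        else taxonomy) []

-- ===== PORT B =====
def decompose_term_py_alt (term : String) : List String :=
  let tokens := PySem.Str.split₀ term
  if tokens.length == 1 then [term]
  else
    ((PySem.List.slice tokens none (some (-1))).foldl
      (fun (st : List String × List String) tok =>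
        let pfx := tok :: st.1
        (pfx, st.2 ++ [PySem.Str.join " " pfx])) ([], [])).2

-- ===== PRECONDITION & SPEC =====
def Spec_decompose_term_py (term : String) (out : List String) : Prop := out = decompose_term_py_alt term
instance (term : String) (out : List String) : Decidable (Spec_decompose_term_py term out) := by unfold Spec_decompose_term_py; infer_instance

-- ===== CLAIM (what is proved, stated in full; the proofs are below) =====
def Claim_equal_decompose_term_py : Prop := ∀ (term : String), Dom_decompose_term_py term → Spec_decompose_term_py term (decompose_term_py term)

-- ===== LEMMAS AND PROOFS =====

-- B's loop invariant: the accumulator pass over ds, started from (p, out),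
-- appends the joins of the successive reversed prefixes of ds (each on top of p).
theorem bfold_eq (ds : List String) (p out : List String) :
    (ds.foldl (fun (st : List String × List String) tok =>
        let pfx := tok :: st.1
        (pfx, st.2 ++ [PySem.Str.join " " pfx])) (p, out)).2
    = out ++ (List.range ds.length).map
        (fun j => PySem.Str.join " " ((ds.take (j+1)).reverse ++ p)) := by
  induction ds generalizing p out with
  | nil => simp
  | cons d ds ih =>
      simp only [List.foldl_cons, ih, List.length_cons, List.range_succ_eq_map,
        List.map_cons, List.map_map]
      simp [List.append_assoc, Function.comp]

-- A's filtered index list: the positive indices of range n, in order.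
theorem range_filter_pos (n : Nat) :
    (List.range n).filter (fun k => k != 0) = (List.range (n-1)).map (· + 1) := by
  cases n with
  | zero => simp
  | succ m =>
      simp only [List.range_succ_eq_map, Nat.add_sub_cancel, List.filter_cons, List.filter_map]
      rw [List.filter_eq_self.2 (by intro a _; simp)]
      simp

-- ===== VERDICT (by name: the statement is the Claim_ definition above) =====
theorem decompose_term_py_spec : Claim_equal_decompose_term_py := by
  intro term _
  unfold Spec_decompose_term_py decompose_term_py decompose_term_py_alt
  set ts := PySem.Str.split₀ term with hts
  by_cases h1 : ts.length = 1
  · simp [h1]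
  · simp only [h1, beq_iff_eq, if_false]
    rw [PySem.List.slice_to_neg_one, bfold_eq]
    rw [PySem.List.pyRange_one]
    simp only [Int.sub_zero, Int.toNat_natCast, List.foldl_map, zero_add]
    rw [PySem.List.foldl_congr_mem
      (g := fun (acc : List String) (k : Nat) =>
        if k != 0 then acc ++ [PySem.Str.join " " ((ts.take k).reverse)] else acc)]
    · rw [PySem.List.foldl_append_if (p := fun k => k != 0)
        (f := fun k => PySem.Str.join " " ((ts.take k).reverse))]
      rw [range_filter_pos, List.map_map, List.length_dropLast]
      simp only [List.nil_append, List.append_nil]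
      apply List.map_congr_left
      intro j hj
      simp only [List.mem_range] at hj
      simp only [Function.comp]
      congr 2
      rw [List.dropLast_eq_take, List.take_take]
      congr 1
      omega
    · intro acc k hk
      simp only [List.mem_range] at hk
      rw [PySem.List.slice_zero_start, PySem.List.slice_to_natCast]
      have hlen : (ts.take k).length = k := by
        rw [List.length_take]; omega
      by_cases hk0 : k = 0
      · simp [hk0]
      · simp [hlen, hk0]
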